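-- pv_equiv track=rewrite | github.com/danieleschmidt/customer-churn-predictor-mlops | tests/quality_gates/coverage_analyzer.py | _determine_function_category
-- ===== SOURCE A (Python) =====
-- def _determine_function_category(function_name: str, code_content: str) -> str:
--     """Determine the category of a function based on its content."""
--     function_name_lower = function_name.lower()
--     code_lower = code_content.lower()
--
--     if any(keyword in function_name_lower for keyword in ['validate', 'check', 'verify']):
--         return 'data_validation'
--     elif any(keyword in function_name_lower for keyword in ['train', 'predict', 'model']):
--         return 'ml_model'
--     elif any(keyword in code_lower for keyword in ['fastapi', 'route', 'endpoint']):
--         return 'api_endpoint'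
--     elif any(keyword in code_lower for keyword in ['database', 'sql', 'query']):
--         return 'database'
--     elif any(keyword in function_name_lower for keyword in ['auth', 'security', 'encrypt']):
--         return 'security'
--     else:
--         return 'general'
-- ===== SOURCE B (Python) =====
-- _KEYWORDS = {
--     'validate': ('name', 'data_validation'),
--     'check': ('name', 'data_validation'),
--     'verify': ('name', 'data_validation'),
--     'train': ('name', 'ml_model'),
--     'predict': ('name', 'ml_model'),
--     'model': ('name', 'ml_model'),
--     'fastapi': ('code', 'api_endpoint'),
--     'route': ('code', 'api_endpoint'),
--     'endpoint': ('code', 'api_endpoint'),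
--     'database': ('code', 'database'),
--     'sql': ('code', 'database'),
--     'query': ('code', 'database'),
--     'auth': ('name', 'security'),
--     'security': ('name', 'security'),
--     'encrypt': ('name', 'security'),
-- }
--
-- _PRIORITY = ['data_validation', 'ml_model', 'api_endpoint', 'database', 'security']
--
--
-- def _determine_function_category(function_name: str, code_content: str) -> str:
--     """Determine the category of a function based on its content.
--
--     Stage 1 collects the set of ALL categories whose keywords occur in the
--     relevant text; stage 2 picks the highest-priority matched category.
--     """
--     texts = {'name': function_name.lower(), 'code': code_content.lower()}
--     matched = {cat for kw, (src, cat) in _KEYWORDS.items() if kw in texts[src]}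
--     return next((cat for cat in _PRIORITY if cat in matched), 'general')
-- ===== Notes on version B (the rewrite author's own statement) =====
-- stated objective: alternative
-- what changed: Instead of A's early-exit if/elif cascade, B first builds the set of ALL categories whose keywords occur in the relevant lowercased text (one pass over a flat keyword->(source,category) table), then picks the highest-priority matched category from a fixed priority list.
import Mathlib
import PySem

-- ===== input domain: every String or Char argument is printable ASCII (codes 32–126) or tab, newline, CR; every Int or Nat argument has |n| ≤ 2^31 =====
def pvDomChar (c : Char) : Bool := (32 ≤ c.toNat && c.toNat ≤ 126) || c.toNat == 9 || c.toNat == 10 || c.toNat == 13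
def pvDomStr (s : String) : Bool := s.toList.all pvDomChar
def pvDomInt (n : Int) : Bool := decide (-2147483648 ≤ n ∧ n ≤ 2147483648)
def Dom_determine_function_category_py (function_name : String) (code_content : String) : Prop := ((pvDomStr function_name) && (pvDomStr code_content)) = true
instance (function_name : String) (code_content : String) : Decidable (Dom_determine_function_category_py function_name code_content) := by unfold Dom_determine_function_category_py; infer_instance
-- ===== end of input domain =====

-- B replaces A's early-exit if/elif cascade by two stages: collect the SET of ALL matched
-- categories from a flat keyword table, then pick the highest-priority matched one
-- (alternative data-driven decomposition, same cost).

-- ===== PORT A =====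
def determine_function_category_py (function_name : String) (code_content : String) : String :=
  let function_name_lower := PySem.Str.lower function_name
  let code_lower := PySem.Str.lower code_content
  if ["validate", "check", "verify"].any (fun keyword => PySem.Str.isIn keyword function_name_lower) then
    "data_validation"
  else if ["train", "predict", "model"].any (fun keyword => PySem.Str.isIn keyword function_name_lower) then
    "ml_model"
  else if ["fastapi", "route", "endpoint"].any (fun keyword => PySem.Str.isIn keyword code_lower) then
    "api_endpoint"
  else if ["database", "sql", "query"].any (fun keyword => PySem.Str.isIn keyword code_lower) then
    "database"
  else if ["auth", "security", "encrypt"].any (fun keyword => PySem.Str.isIn keyword function_name_lower) then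
    "security"
  else
    "general"

-- ===== PORT B =====
-- _KEYWORDS: the module-level dict, as its items list (keyword, (source, category))
def pvKeywordTable : List (String × String × String) :=
  [ ("validate", "name", "data_validation"),
    ("check", "name", "data_validation"),
    ("verify", "name", "data_validation"),
    ("train", "name", "ml_model"),
    ("predict", "name", "ml_model"),
    ("model", "name", "ml_model"),
    ("fastapi", "code", "api_endpoint"),
    ("route", "code", "api_endpoint"),
    ("endpoint", "code", "api_endpoint"),
    ("database", "code", "database"),
    ("sql", "code", "database"),
    ("query", "code", "database"),
    ("auth", "name", "security"),
    ("security", "name", "security"),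
    ("encrypt", "name", "security") ]

-- _PRIORITY
def pvPriority : List String :=
  ["data_validation", "ml_model", "api_endpoint", "database", "security"]

def determine_function_category_py_alt (function_name : String) (code_content : String) : String :=
  let texts : PySem.Dict String String :=
    PySem.Dict.mk [("name", PySem.Str.lower function_name), ("code", PySem.Str.lower code_content)]
  -- stage 1: {cat for kw, (src, cat) in _KEYWORDS.items() if kw in texts[src]}
  let matched : PySem.Set String :=
    PySem.Set.ofList
      ((pvKeywordTable.filter (fun r => PySem.Str.isIn r.1 (texts.getD r.2.1 ""))).map
        (fun r => r.2.2))
  -- stage 2: next((cat for cat in _PRIORITY if cat in matched), 'general')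
  (pvPriority.find? (fun cat => PySem.Set.contains matched cat)).getD "general"

-- ===== PRECONDITION & SPEC =====
def Spec_determine_function_category_py (function_name : String) (code_content : String) (out : String) : Prop := out = determine_function_category_py_alt function_name code_content
instance (function_name : String) (code_content : String) (out : String) : Decidable (Spec_determine_function_category_py function_name code_content out) := by unfold Spec_determine_function_category_py; infer_instance

-- ===== CLAIM (what is proved, stated in full; the proofs are below) =====
def Claim_equal_determine_function_category_py : Prop := ∀ (function_name : String) (code_content : String), Dom_determine_function_category_py function_name code_content → Spec_determine_function_category_py function_name code_content (determine_function_category_py function_name code_content)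

-- ===== LEMMAS AND PROOFS =====

-- The matched set of B, as it appears after unfolding the port's lets.
def pvMatched (fn cc : String) : PySem.Set String :=
  PySem.Set.ofList
    ((pvKeywordTable.filter (fun r =>
        PySem.Str.isIn r.1
          ((PySem.Dict.mk [("name", PySem.Str.lower fn), ("code", PySem.Str.lower cc)]).getD r.2.1 ""))).map
      (fun r => r.2.2))

-- membership of each category in B's matched set = the disjunction of its keyword tests
theorem pv_contains_dv (fn cc : String) :
    List.contains (pvMatched fn cc) "data_validation" =
      (PySem.Str.isIn "validate" (PySem.Str.lower fn) || PySem.Str.isIn "check" (PySem.Str.lower fn) ||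
        PySem.Str.isIn "verify" (PySem.Str.lower fn)) := by
  simp only [pvMatched, List.contains_eq_mem, PySem.Set.mem_ofList]
  rw [Bool.eq_iff_iff]
  simp [List.mem_map, List.mem_filter, pvKeywordTable, PySem.Dict.getD,
    or_and_right, exists_or, and_assoc, PySem.Dict.get?]
  tauto

theorem pv_contains_ml (fn cc : String) :
    List.contains (pvMatched fn cc) "ml_model" =
      (PySem.Str.isIn "train" (PySem.Str.lower fn) || PySem.Str.isIn "predict" (PySem.Str.lower fn) ||
        PySem.Str.isIn "model" (PySem.Str.lower fn)) := by
  simp only [pvMatched, List.contains_eq_mem, PySem.Set.mem_ofList]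
  rw [Bool.eq_iff_iff]
  simp [List.mem_map, List.mem_filter, pvKeywordTable, PySem.Dict.getD,
    or_and_right, exists_or, and_assoc, PySem.Dict.get?]
  tauto

theorem pv_contains_api (fn cc : String) :
    List.contains (pvMatched fn cc) "api_endpoint" =
      (PySem.Str.isIn "fastapi" (PySem.Str.lower cc) || PySem.Str.isIn "route" (PySem.Str.lower cc) ||
        PySem.Str.isIn "endpoint" (PySem.Str.lower cc)) := by
  simp only [pvMatched, List.contains_eq_mem, PySem.Set.mem_ofList]
  rw [Bool.eq_iff_iff]
  simp [List.mem_map, List.mem_filter, pvKeywordTable, PySem.Dict.getD,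
    or_and_right, exists_or, and_assoc, PySem.Dict.get?]
  tauto

theorem pv_contains_db (fn cc : String) :
    List.contains (pvMatched fn cc) "database" =
      (PySem.Str.isIn "database" (PySem.Str.lower cc) || PySem.Str.isIn "sql" (PySem.Str.lower cc) ||
        PySem.Str.isIn "query" (PySem.Str.lower cc)) := by
  simp only [pvMatched, List.contains_eq_mem, PySem.Set.mem_ofList]
  rw [Bool.eq_iff_iff]
  simp [List.mem_map, List.mem_filter, pvKeywordTable, PySem.Dict.getD,
    or_and_right, exists_or, and_assoc, PySem.Dict.get?]
  tauto

theorem pv_contains_sec (fn cc : String) :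
    List.contains (pvMatched fn cc) "security" =
      (PySem.Str.isIn "auth" (PySem.Str.lower fn) || PySem.Str.isIn "security" (PySem.Str.lower fn) ||
        PySem.Str.isIn "encrypt" (PySem.Str.lower fn)) := by
  simp only [pvMatched, List.contains_eq_mem, PySem.Set.mem_ofList]
  rw [Bool.eq_iff_iff]
  simp [List.mem_map, List.mem_filter, pvKeywordTable, PySem.Dict.getD,
    or_and_right, exists_or, and_assoc, PySem.Dict.get?]
  tauto

-- ===== VERDICT (by name: the statement is the Claim_ definition above) =====
theorem determine_function_category_py_spec : Claim_equal_determine_function_category_py := by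
  intro fn cc _
  unfold Spec_determine_function_category_py determine_function_category_py determine_function_category_py_alt
  show (if ["validate", "check", "verify"].any (fun keyword => PySem.Str.isIn keyword (PySem.Str.lower fn)) then
      "data_validation"
    else if ["train", "predict", "model"].any (fun keyword => PySem.Str.isIn keyword (PySem.Str.lower fn)) then
      "ml_model"
    else if ["fastapi", "route", "endpoint"].any (fun keyword => PySem.Str.isIn keyword (PySem.Str.lower cc)) then
      "api_endpoint"
    else if ["database", "sql", "query"].any (fun keyword => PySem.Str.isIn keyword (PySem.Str.lower cc)) then
      "database"
    else if ["auth", "security", "encrypt"].any (fun keyword => PySem.Str.isIn keyword (PySem.Str.lower fn)) then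
      "security"
    else "general")
    = (pvPriority.find? (fun cat => PySem.Set.contains (pvMatched fn cc) cat)).getD "general"
  simp only [pvPriority, List.find?, PySem.Set.contains, List.any_cons, List.any_nil,
    pv_contains_dv, pv_contains_ml, pv_contains_api, pv_contains_db, pv_contains_sec,
    Bool.or_false, Bool.or_assoc]
  generalize (PySem.Str.isIn "validate" (PySem.Str.lower fn) || (PySem.Str.isIn "check" (PySem.Str.lower fn) || PySem.Str.isIn "verify" (PySem.Str.lower fn))) = c1
  generalize (PySem.Str.isIn "train" (PySem.Str.lower fn) || (PySem.Str.isIn "predict" (PySem.Str.lower fn) || PySem.Str.isIn "model" (PySem.Str.lower fn))) = c2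
  generalize (PySem.Str.isIn "fastapi" (PySem.Str.lower cc) || (PySem.Str.isIn "route" (PySem.Str.lower cc) || PySem.Str.isIn "endpoint" (PySem.Str.lower cc))) = c3
  generalize (PySem.Str.isIn "database" (PySem.Str.lower cc) || (PySem.Str.isIn "sql" (PySem.Str.lower cc) || PySem.Str.isIn "query" (PySem.Str.lower cc))) = c4
  generalize (PySem.Str.isIn "auth" (PySem.Str.lower fn) || (PySem.Str.isIn "security" (PySem.Str.lower fn) || PySem.Str.isIn "encrypt" (PySem.Str.lower fn))) = c5
  cases c1 <;> cases c2 <;> cases c3 <;> cases c4 <;> cases c5 <;> rfl
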